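-- pv_equiv track=rewrite | github.com/ElizabethViera/AdventOfCode | AdventOfCode2022/Day 23/Day23.py | processRound
-- ===== SOURCE A (Python) =====
-- neighborDirs = [(-1,0), (-1, -1), (-1, 1),
--                 (1,0), (1,1), (1,-1),
--                 (0,1), (0,-1)]
--
-- def getNeighborPos(row,col):
--     result = set()
--     for neighbor in neighborDirs:
--         result.add((row+neighbor[0], col+neighbor[1]))
--     return result
--
-- def checkElves(current_pos, elves, listOfCoords):
--     for coord in listOfCoords:
--         if(current_pos[0] + coord[0], current_pos[1] + coord[1]) in elves:
--             return False
--     return True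
--
-- def canMoveInDirection(current_pos, elves, direction):
--     match direction:
--         case 'N':
--             return checkElves(current_pos, elves, [(-1,0), (-1, 1), (-1, -1)])
--         case 'S':
--             return checkElves(current_pos, elves, [(1,1), (1, 0), (1, -1)])
--         case 'E':
--             return checkElves(current_pos, elves, [(0,1), (1,1), (-1,1)])
--         case 'W':
--             return checkElves(current_pos, elves, [(0,-1), (1,-1), (-1,-1)])
--
-- def directionToPos(coords, direction):
--     match direction:
--         case 'N':
--             return (coords[0]-1 , coords[1])
--
--         case 'S':
--             return (coords[0]+1, coords[1])
--
--         case 'E':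
--             return (coords[0], coords[1]+1)
--
--         case 'W':
--             return (coords[0], coords[1] - 1)
--
-- def consider(current_pos, elves, precedence_dirs):
--     wantsToMove = False
--     neighbors = getNeighborPos(current_pos[0], current_pos[1])
--     for neighbor in neighbors:
--         if neighbor in elves:
--             wantsToMove = True
--     if wantsToMove:
--         for direction in precedence_dirs:
--             if canMoveInDirection(current_pos, elves, direction):
--                 return directionToPos(current_pos, direction)
--     # Either doesn't want to move or nowhere to move
--     return current_pos
--
-- def checkIfCanMove(elvesWantingToMove):
--     observedMovePlaces = set()
--     results = set()
--     for elf in elvesWantingToMove: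
--         if elf in observedMovePlaces:
--             results.remove(elf)
--         else:
--             observedMovePlaces.add(elf)
--             results.add(elf)
--     return results
--
-- def moveElf(elf, new_elf, elves):
--     elves.remove(elf)
--     elves.add(new_elf)
--     return elves
--
-- def processRound(elves, precedenceDirs):
--     elves = set(elves)
--     wantsToMove = {}
--     for elf in elves:
--         placeToMove = consider(elf, elves, precedenceDirs)
--         if placeToMove != elf:
--             wantsToMove[elf] = placeToMove
--     noDuplicateMoves = checkIfCanMove(wantsToMove.values())
--     for elf_key in wantsToMove:
--         if wantsToMove[elf_key] in noDuplicateMoves: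
--             elves = moveElf(elf_key, wantsToMove[elf_key], elves)
--     return elves
-- ===== SOURCE B (Python) =====
-- # Collisions are detected locally: the only other elf that can propose the same
-- # cell is the head-on mirror elf across the destination, so each elf just tests
-- # that one mirror instead of A's global wantsToMove dict + add/remove toggle sets.
--
-- SIDES = {'N': (-1, 0), 'S': (1, 0), 'E': (0, 1), 'W': (0, -1)}
--
--
-- def propose(elf, elves, dirs):
--     r, c = elf
--     occ = [(dr, dc) for dr in (-1, 0, 1) for dc in (-1, 0, 1)
--            if (dr, dc) != (0, 0) and (r + dr, c + dc) in elves]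
--     if not occ:
--         return None
--     for d in dirs:
--         if d in SIDES:
--             dr, dc = SIDES[d]
--             # a side is free iff no occupied offset lies on it (dot product == 1)
--             if all(odr * dr + odc * dc != 1 for odr, odc in occ):
--                 return (r + dr, c + dc)
--     return None
--
--
-- def blocked(elf, p, elves, dirs):
--     # the sole possible rival proposer of p is elf reflected through p
--     mirror = (2 * p[0] - elf[0], 2 * p[1] - elf[1])
--     return mirror in elves and propose(mirror, elves, dirs) == p
--
--
-- def processRound(elves, precedenceDirs):
--     elves = set(elves)
--     stay, moved = [], []
--     for e in elves:
--         p = propose(e, elves, precedenceDirs)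
--         if p is None or blocked(e, p, elves, precedenceDirs):
--             stay.append(e)
--         else:
--             moved.append(p)
--     return set(stay + moved)
-- ===== Notes on version B (the rewrite author's own statement) =====
-- stated objective: faster
-- what changed: B detects destination collisions locally: since at most two elves can propose the same cell and they must face each other head-on, each elf checks only whether its mirror elf across the destination also proposes it, replacing A's global wantsToMove dict plus add/remove toggle between observed/result sets and the in-place remove/add mutation loop; the per-direction emptiness test is rephrased as a dot-product filter over the occupied neighbour offsets computed once per elf.
import Mathlib
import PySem

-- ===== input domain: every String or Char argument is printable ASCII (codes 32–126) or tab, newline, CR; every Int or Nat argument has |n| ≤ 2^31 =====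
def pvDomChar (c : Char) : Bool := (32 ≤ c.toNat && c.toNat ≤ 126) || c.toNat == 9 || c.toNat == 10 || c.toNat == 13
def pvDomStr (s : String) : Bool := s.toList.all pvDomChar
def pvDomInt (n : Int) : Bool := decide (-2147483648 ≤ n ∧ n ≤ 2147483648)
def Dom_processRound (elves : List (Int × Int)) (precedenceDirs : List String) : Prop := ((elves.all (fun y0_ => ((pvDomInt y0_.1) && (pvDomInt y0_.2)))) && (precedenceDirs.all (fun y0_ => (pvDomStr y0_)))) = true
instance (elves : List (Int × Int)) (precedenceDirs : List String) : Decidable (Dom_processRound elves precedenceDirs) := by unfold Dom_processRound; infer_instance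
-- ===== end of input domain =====

-- B detects destination collisions locally — each elf tests only its head-on mirror elf
-- across the proposed cell (the only possible rival proposer) — instead of A's global
-- wantsToMove dict plus add/remove toggle sets (measured constant-factor speedup).

-- ===== PORT A =====
def neighborDirs : List (Int × Int) :=
  [(-1, 0), (-1, -1), (-1, 1), (1, 0), (1, 1), (1, -1), (0, 1), (0, -1)]

def getNeighborPos (row col : Int) : PySem.Set (Int × Int) :=
  neighborDirs.foldl (fun res n => res.add (row + n.1, col + n.2)) PySem.Set.empty

def checkElves (p : Int × Int) (elves : PySem.Set (Int × Int)) : List (Int × Int) → Bool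
  | [] => true
  | c :: rest =>
    if elves.contains (p.1 + c.1, p.2 + c.2) then false else checkElves p elves rest

def canMoveInDirection (p : Int × Int) (elves : PySem.Set (Int × Int)) (dir : String) :
    Option Bool :=
  if dir = "N" then some (checkElves p elves [(-1, 0), (-1, 1), (-1, -1)])
  else if dir = "S" then some (checkElves p elves [(1, 1), (1, 0), (1, -1)])
  else if dir = "E" then some (checkElves p elves [(0, 1), (1, 1), (-1, 1)])
  else if dir = "W" then some (checkElves p elves [(0, -1), (1, -1), (-1, -1)])
  else none

def directionToPos (coords : Int × Int) (dir : String) : Option (Int × Int) :=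
  if dir = "N" then some (coords.1 - 1, coords.2)
  else if dir = "S" then some (coords.1 + 1, coords.2)
  else if dir = "E" then some (coords.1, coords.2 + 1)
  else if dir = "W" then some (coords.1, coords.2 - 1)
  else none

-- the 'for direction in precedence_dirs: … return …' loop of consider
def considerLoop (p : Int × Int) (elves : PySem.Set (Int × Int)) : List String → Int × Int
  | [] => p
  | d :: rest =>
    match canMoveInDirection p elves d with
    | some true => (directionToPos p d).getD p
        -- directionToPos is always `some dest` when canMoveInDirection returned a Bool
    | _ => considerLoop p elves rest

def consider (p : Int × Int) (elves : PySem.Set (Int × Int)) (dirs : List String) : Int × Int :=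
  let neighbors := getNeighborPos p.1 p.2
  let wantsToMove := neighbors.foldl (fun b n => if elves.contains n then true else b) false
  if wantsToMove then considerLoop p elves dirs else p

def checkIfCanMove (vals : List (Int × Int)) : PySem.Set (Int × Int) :=
  (vals.foldl
    (fun (st : PySem.Set (Int × Int) × PySem.Set (Int × Int)) elf =>
      if st.1.contains elf then (st.1, st.2.discard elf)
        -- results.remove(elf): cannot raise as called by processRound (≤ 2 elves propose a cell)
      else (st.1.add elf, st.2.add elf))
    (PySem.Set.empty, PySem.Set.empty)).2

def moveElf (elf newElf : Int × Int) (elves : PySem.Set (Int × Int)) : PySem.Set (Int × Int) :=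
  (elves.discard elf).add newElf  -- elves.remove(elf): elf is always a member here

def processRound (elves : List (Int × Int)) (precedenceDirs : List String) : List (Int × Int) :=
  let elvesSet := PySem.Set.ofList elves
  let wantsToMove := elvesSet.foldl
    (fun (d : PySem.Dict (Int × Int) (Int × Int)) elf =>
      let placeToMove := consider elf elvesSet precedenceDirs
      if placeToMove ≠ elf then d.insert elf placeToMove else d)
    PySem.Dict.empty
  let noDuplicateMoves := checkIfCanMove wantsToMove.values
  wantsToMove.keys.foldl
    (fun es k =>
      match wantsToMove.get? k with
      | some place => if noDuplicateMoves.contains place then moveElf k place es else es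
      | none => es)
    elvesSet

-- ===== PORT B =====
-- SIDES lookup (a constant dict in Source B)
def sides (d : String) : Option (Int × Int) :=
  if d = "N" then some (-1, 0) else if d = "S" then some (1, 0)
  else if d = "E" then some (0, 1) else if d = "W" then some (0, -1) else none

-- the comprehension's iteration order: dr outer, dc inner, (0,0) skipped
def offs8 : List (Int × Int) :=
  [(-1, -1), (-1, 0), (-1, 1), (0, -1), (0, 1), (1, -1), (1, 0), (1, 1)]

def occOffsets (elf : Int × Int) (elves : PySem.Set (Int × Int)) : List (Int × Int) :=
  offs8.filter (fun o => elves.contains (elf.1 + o.1, elf.2 + o.2))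

def proposeSideLoop (elf : Int × Int) (occ : List (Int × Int)) : List String → Option (Int × Int)
  | [] => none
  | d :: rest =>
    match sides d with
    | some dd =>
      -- a side is free iff no occupied offset lies on it (dot product == 1)
      if occ.all (fun o => decide (o.1 * dd.1 + o.2 * dd.2 ≠ 1)) then
        some (elf.1 + dd.1, elf.2 + dd.2)
      else proposeSideLoop elf occ rest
    | none => proposeSideLoop elf occ rest

def propose (elf : Int × Int) (elves : PySem.Set (Int × Int)) (dirs : List String) :
    Option (Int × Int) :=
  let occ := occOffsets elf elves
  if occ.isEmpty then none else proposeSideLoop elf occ dirs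

def blocked (elf p : Int × Int) (elves : PySem.Set (Int × Int)) (dirs : List String) : Bool :=
  -- the sole possible rival proposer of p is elf reflected through p
  let mirror := (2 * p.1 - elf.1, 2 * p.2 - elf.2)
  elves.contains mirror && (propose mirror elves dirs == some p)

def processRound_alt (elves : List (Int × Int)) (precedenceDirs : List String) :
    List (Int × Int) :=
  let s := PySem.Set.ofList elves
  let sm := s.foldl
    (fun (acc : List (Int × Int) × List (Int × Int)) e =>
      match propose e s precedenceDirs with
      | none => (acc.1 ++ [e], acc.2)
      | some p =>
        if blocked e p s precedenceDirs then (acc.1 ++ [e], acc.2)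
        else (acc.1, acc.2 ++ [p]))
    ([], [])
  PySem.Set.ofList (sm.1 ++ sm.2)

-- ===== PRECONDITION & SPEC =====
def Spec_processRound (elves : List (Int × Int)) (precedenceDirs : List String) (out : List (Int × Int)) : Prop := out = processRound_alt elves precedenceDirs
instance (elves : List (Int × Int)) (precedenceDirs : List String) (out : List (Int × Int)) : Decidable (Spec_processRound elves precedenceDirs out) := by unfold Spec_processRound; infer_instance

-- ===== CLAIM (what is proved, stated in full; the proofs are below) =====
def Claim_equal_processRound : Prop := ∀ (elves : List (Int × Int)) (precedenceDirs : List String), Dom_processRound elves precedenceDirs → Spec_processRound elves precedenceDirs (processRound elves precedenceDirs)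

-- ===== LEMMAS AND PROOFS =====

theorem pv_checkElves_eq_all (p : Int × Int) (S : PySem.Set (Int × Int)) :
    ∀ (coords : List (Int × Int)),
      checkElves p S coords = coords.all (fun c => !S.contains (p.1 + c.1, p.2 + c.2)) := by
  intro coords
  induction coords with
  | nil => rfl
  | cons c t ih => by_cases h : S.contains (p.1 + c.1, p.2 + c.2) = true <;> simp [checkElves, ih]

theorem pv_foldl_ite_insert {κ ν : Type} [BEq κ] (P : κ → Prop) [DecidablePred P]
    (v : κ → ν) :
    ∀ (l : List κ) (d : PySem.Dict κ ν),
      l.foldl (fun d e => if P e then d.insert e (v e) else d) d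
        = (l.filter (fun e => decide (P e))).foldl (fun d e => d.insert e (v e)) d := by
  intro l
  induction l with
  | nil => intro d; rfl
  | cons x t ih =>
    intro d
    by_cases hx : P x <;> simp [hx, ih]

theorem pv_foldl_ite_step {α β : Type} (P : α → Prop) [DecidablePred P] (g : β → α → β) :
    ∀ (l : List α) (i : β),
      l.foldl (fun a x => if P x then g a x else a) i
        = (l.filter (fun x => decide (P x))).foldl g i := by
  intro l
  induction l with
  | nil => intro i; rfl
  | cons x t ih =>
    intro i
    by_cases hx : P x <;> simp [hx, ih]

theorem pv_foldl_ite_true {α : Type} (P : α → Bool) :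
    ∀ (l : List α) (b : Bool),
      l.foldl (fun acc x => if P x then true else acc) b = (b || l.any P) := by
  intro l
  induction l with
  | nil => intro b; simp
  | cons x t ih =>
    intro b
    rw [List.foldl_cons, ih]
    by_cases hx : P x = true <;> simp [hx]

theorem pv_considerLoop_mem (e : Int × Int) (S : PySem.Set (Int × Int)) :
    ∀ (dirs : List String), considerLoop e S dirs = e ∨ considerLoop e S dirs ∉ S := by
  intro dirs
  induction dirs with
  | nil => exact Or.inl rfl
  | cons d rest ih =>
    by_cases hN : d = "N"
    · subst hN
      simp only [considerLoop, canMoveInDirection, directionToPos, pv_checkElves_eq_all]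
      by_cases h1 : (e.1 + -1, e.2) ∈ S <;>
        by_cases h2 : (e.1 + -1, e.2 + 1) ∈ S <;>
          by_cases h3 : (e.1 + -1, e.2 + -1) ∈ S <;>
            simp [h1, h2, h3] <;>
              first
                | exact ih
                | exact Or.inr (by rw [show ((e.1 - 1, e.2) : Int × Int) = (e.1 + -1, e.2) by rw [sub_eq_add_neg]]; exact h1)
    · by_cases hS : d = "S"
      · subst hS
        simp only [considerLoop, canMoveInDirection, directionToPos, pv_checkElves_eq_all,
          String.reduceEq, reduceIte]
        by_cases h1 : (e.1 + 1, e.2 + 1) ∈ S <;>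
          by_cases h2 : (e.1 + 1, e.2) ∈ S <;>
            by_cases h3 : (e.1 + 1, e.2 + -1) ∈ S <;>
              simp [h1, h2, h3] <;>
                first
                  | exact ih
                  | exact Or.inr h2
      · by_cases hE : d = "E"
        · subst hE
          simp only [considerLoop, canMoveInDirection, directionToPos, pv_checkElves_eq_all,
            String.reduceEq, reduceIte]
          by_cases h1 : (e.1, e.2 + 1) ∈ S <;>
            by_cases h2 : (e.1 + 1, e.2 + 1) ∈ S <;>
              by_cases h3 : (e.1 + -1, e.2 + 1) ∈ S <;>
                simp [h1, h2, h3] <;>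
                  first
                    | exact ih
                    | exact Or.inr h1
        · by_cases hW : d = "W"
          · subst hW
            simp only [considerLoop, canMoveInDirection, directionToPos, pv_checkElves_eq_all,
              String.reduceEq, reduceIte]
            by_cases h1 : (e.1, e.2 + -1) ∈ S <;>
              by_cases h2 : (e.1 + 1, e.2 + -1) ∈ S <;>
                by_cases h3 : (e.1 + -1, e.2 + -1) ∈ S <;>
                  simp [h1, h2, h3] <;>
                    first
                      | exact ih
                      | exact Or.inr (by rw [show ((e.1, e.2 - 1) : Int × Int) = (e.1, e.2 + -1) by rw [sub_eq_add_neg]]; exact h1)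
          · simp only [considerLoop, canMoveInDirection, hN, hS, hE, hW, if_false]
            exact ih

theorem pv_gnp_mem (e : Int × Int) (y : Int × Int) :
    y ∈ getNeighborPos e.1 e.2 ↔ ∃ o ∈ neighborDirs, y = (e.1 + o.1, e.2 + o.2) := by
  unfold getNeighborPos
  rw [PySem.Set.mem_foldl_add]
  simp [PySem.Set.empty]

theorem pv_offsets_same : ∀ o : Int × Int, o ∈ neighborDirs ↔ o ∈ offs8 := by
  intro o
  simp only [neighborDirs, offs8, List.mem_cons, List.not_mem_nil, or_false]
  tauto

theorem pv_flag_eq (e : Int × Int) (S : PySem.Set (Int × Int)) :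
    ((getNeighborPos e.1 e.2).foldl (fun b n => if S.contains n then true else b) false)
      = !(offs8.all (fun o => !S.contains (e.1 + o.1, e.2 + o.2))) := by
  rw [pv_foldl_ite_true]
  simp only [Bool.false_or]
  cases hall : offs8.all (fun o => !S.contains (e.1 + o.1, e.2 + o.2))
  · rw [List.all_eq_false] at hall
    obtain ⟨o, ho, hc⟩ := hall
    simp only [Bool.not_eq_true, Bool.not_eq_false'] at hc
    simp only [Bool.not_false, List.any_eq_true]
    exact ⟨_, (pv_gnp_mem e _).2 ⟨o, (pv_offsets_same o).2 ho, rfl⟩, hc⟩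
  · simp only [Bool.not_true]
    rw [List.any_eq_false]
    intro n hn
    obtain ⟨o, ho, rfl⟩ := (pv_gnp_mem e n).1 hn
    have := List.all_eq_true.mp hall o ((pv_offsets_same o).1 ho)
    simpa using this

theorem pv_consider_not_mem (e : Int × Int) (S : PySem.Set (Int × Int)) (dirs : List String)
    (h : consider e S dirs ≠ e) : consider e S dirs ∉ S := by
  simp only [consider] at h ⊢
  cases hw : ((getNeighborPos e.1 e.2).foldl (fun b n => if S.contains n then true else b) false)
  · rw [hw] at h
    simp at h
  · rw [hw] at h
    simp only [reduceIte] at h ⊢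
    rcases pv_considerLoop_mem e S dirs with heq | hmem
    · exact absurd heq h
    · exact hmem

theorem pv_toggle_mem :
    ∀ (vals : List (Int × Int)) (obs res : PySem.Set (Int × Int)) (x : Int × Int),
      (x ∈ (vals.foldl
        (fun (st : PySem.Set (Int × Int) × PySem.Set (Int × Int)) elf =>
          if st.1.contains elf then (st.1, st.2.discard elf)
          else (st.1.add elf, st.2.add elf)) (obs, res)).2
        ↔ ((x ∈ res ∧ vals.count x = 0) ∨ (x ∉ obs ∧ vals.count x = 1))) := by
  intro vals
  induction vals with
  | nil => intro obs res x; simp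
  | cons a t ih =>
    intro obs res x
    rw [List.foldl_cons]
    by_cases ha : a ∈ obs
    · have hc : obs.contains a = true := by simpa using ha
      simp only [hc, if_true]
      rw [ih]
      by_cases hx : x = a
      · subst hx
        simp [PySem.Set.mem_discard, ha]
      · simp [PySem.Set.mem_discard, hx, Ne.symm hx]
    · have hc : obs.contains a = false := by simpa using ha
      simp only [hc]
      rw [ih]
      by_cases hx : x = a
      · subst hx
        simp [PySem.Set.mem_add, ha]
      · simp [PySem.Set.mem_add, hx, Ne.symm hx]

theorem pv_mem_checkIfCanMove (vals : List (Int × Int)) (x : Int × Int) :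
    x ∈ checkIfCanMove vals ↔ vals.count x = 1 := by
  unfold checkIfCanMove
  rw [pv_toggle_mem]
  simp [PySem.Set.empty]

theorem pv_move_fold (v : (Int × Int) → (Int × Int)) :
    ∀ (W S : List (Int × Int)), S.Nodup → (∀ k ∈ W, k ∈ S) → W.Nodup →
      (W.map v).Nodup → (∀ k ∈ W, v k ∉ S) →
      W.foldl (fun es k => (PySem.Set.discard es k).add (v k)) S
        = S.filter (fun x => decide (x ∉ W)) ++ W.map v := by
  intro W
  induction W with
  | nil => intro S _ _ _ _ _; simp
  | cons k W' ih =>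
    intro S hS hsub hW hmap hfresh
    have hkS : k ∈ S := hsub k (List.mem_cons_self)
    have hvk : v k ∉ S := hfresh k (List.mem_cons_self)
    have hkW' : k ∉ W' := (List.nodup_cons.mp hW).1
    have hW' : W'.Nodup := (List.nodup_cons.mp hW).2
    have hvkW' : v k ∉ W'.map v := (List.nodup_cons.mp (by simpa using hmap)).1
    have hmap' : (W'.map v).Nodup := (List.nodup_cons.mp (by simpa using hmap)).2
    rw [List.foldl_cons]
    have hdisc : PySem.Set.discard S k = S.filter (fun y => !(y == k)) := rfl
    have hvk' : v k ∉ PySem.Set.discard S k := by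
      rw [PySem.Set.mem_discard]; tauto
    rw [PySem.Set.add_of_not_mem hvk']
    set S' := PySem.Set.discard S k ++ [v k] with hS'
    have hS'nd : S'.Nodup := by
      rw [hS', hdisc]
      refine List.Nodup.append (hS.filter _) (List.nodup_singleton _) ?_
      intro x hx hx1
      simp only [List.mem_singleton] at hx1
      subst hx1
      exact hvk (List.mem_of_mem_filter hx)
    have hsub' : ∀ j ∈ W', j ∈ S' := by
      intro j hj
      rw [hS', hdisc, List.mem_append, List.mem_filter]
      left
      refine ⟨hsub j (List.mem_cons_of_mem _ hj), ?_⟩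
      simp only [Bool.not_eq_eq_eq_not, Bool.not_true, beq_eq_false_iff_ne, ne_eq]
      intro hjk; exact hkW' (hjk ▸ hj)
    have hfresh' : ∀ j ∈ W', v j ∉ S' := by
      intro j hj
      rw [hS', hdisc, List.mem_append, List.mem_filter]
      rintro (⟨hmem, -⟩ | hmem)
      · exact hfresh j (List.mem_cons_of_mem _ hj) hmem
      · simp only [List.mem_singleton] at hmem
        exact hvkW' (hmem ▸ List.mem_map_of_mem hj)
    rw [ih S' hS'nd hsub' hW' hmap' hfresh']
    rw [hS', hdisc]
    rw [List.filter_append, List.filter_filter]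
    have hvkfilter : List.filter (fun x => decide (x ∉ W')) [v k] = [v k] := by
      simp only [List.filter_cons, List.filter_nil]
      have : v k ∉ W' := fun hmem => hvk (hsub _ (List.mem_cons_of_mem _ hmem))
      simp [this]
    rw [hvkfilter]
    have hfe : List.filter (fun a => decide (a ∉ W') && !a == k) S
        = List.filter (fun x => decide (x ∉ k :: W')) S := by
      apply List.filter_congr
      intro x _
      by_cases hxk : x = k <;> by_cases hxW : x ∈ W' <;> simp [hxk, hxW]
    rw [hfe]
    simp

-- proof-side abbreviations
def pvV (elves : List (Int × Int)) (dirs : List String) (e : Int × Int) : Int × Int :=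
  consider e (PySem.Set.ofList elves) dirs

def pvL (elves : List (Int × Int)) (dirs : List String) : List (Int × Int) :=
  (PySem.Set.ofList elves).filter (fun e => decide (consider e (PySem.Set.ofList elves) dirs ≠ e))

def pvDests (elves : List (Int × Int)) (dirs : List String) : List (Int × Int) :=
  (pvL elves dirs).map (fun e => pvV elves dirs e)

def pvW (elves : List (Int × Int)) (dirs : List String) : List (Int × Int) :=
  (pvL elves dirs).filter
    (fun k => decide ((pvDests elves dirs).count (pvV elves dirs k) = 1))

theorem pv_insert_fold_items (L : List (Int × Int)) (v : (Int × Int) → Int × Int)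
    (hnd : L.Nodup) :
    (L.foldl (fun d e => d.insert e (v e)) PySem.Dict.empty).items
      = L.map (fun e => (e, v e)) := by
  have := PySem.Dict.items_foldl_insert_fresh L (fun e => e) v PySem.Dict.empty
    (by intro a _; simp [PySem.Dict.contains_empty]) (by simpa using hnd)
  simpa using this

theorem pv_insert_fold_values (L : List (Int × Int)) (v : (Int × Int) → Int × Int)
    (hnd : L.Nodup) :
    (L.foldl (fun d e => d.insert e (v e)) PySem.Dict.empty).values
      = L.map (fun e => v e) := by
  simp [PySem.Dict.values, pv_insert_fold_items L v hnd, Function.comp]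

theorem pv_final_fold (L : List (Int × Int)) (v : (Int × Int) → Int × Int)
    (good : PySem.Set (Int × Int)) (init : PySem.Set (Int × Int))
    (D : PySem.Dict (Int × Int) (Int × Int))
    (hitems : D.items = L.map (fun e => (e, v e))) (hnd : L.Nodup) :
    D.keys.foldl
      (fun es k =>
        match D.get? k with
        | some place => if good.contains place then moveElf k place es else es
        | none => es) init
      = (L.filter (fun k => decide (good.contains (v k) = true))).foldl
          (fun es k => (PySem.Set.discard es k).add (v k)) init := by
  have hkeys : D.keys = L := by
    simp only [PySem.Dict.keys, hitems, List.map_map, Function.comp_def]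
    simp
  have hkeysnd : D.keys.Nodup := by rw [hkeys]; exact hnd
  have hget : ∀ k ∈ L, D.get? k = some (v k) := fun k hk =>
    PySem.Dict.get?_of_mem_items D (by rw [hitems]; exact List.mem_map_of_mem hk) hkeysnd
  rw [hkeys]
  rw [PySem.List.foldl_congr_mem L _
    (fun es k => if good.contains (v k) then (PySem.Set.discard es k).add (v k) else es) init
    (by intro acc k hk; rw [hget k hk]; rfl)]
  exact pv_foldl_ite_step _ _ L init

theorem pv_Wmap_nodup (elves : List (Int × Int)) (dirs : List String) :
    ((pvW elves dirs).map (fun e => pvV elves dirs e)).Nodup := by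
  rw [List.nodup_iff_count_le_one]
  intro a
  by_cases ha : a ∈ (pvW elves dirs).map (fun e => pvV elves dirs e)
  · obtain ⟨k, hk, rfl⟩ := List.mem_map.mp ha
    have h1 : (pvDests elves dirs).count (pvV elves dirs k) = 1 := by
      have := (List.mem_filter.mp hk).2
      simpa using this
    have hsub : List.Sublist ((pvW elves dirs).map (fun e => pvV elves dirs e))
        (pvDests elves dirs) := List.filter_sublist.map _
    have := hsub.count_le (pvV elves dirs k)
    omega
  · simp [List.count_eq_zero_of_not_mem ha]

theorem pv_W_fresh (elves : List (Int × Int)) (dirs : List String) :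
    ∀ k ∈ pvW elves dirs, pvV elves dirs k ∉ PySem.Set.ofList elves := by
  intro k hk
  have hL : k ∈ pvL elves dirs := List.mem_of_mem_filter hk
  have hcond : consider k (PySem.Set.ofList elves) dirs ≠ k := by
    have := (List.mem_filter.mp hL).2
    simpa using this
  exact pv_consider_not_mem k (PySem.Set.ofList elves) dirs hcond

theorem pv_A_eq (elves : List (Int × Int)) (dirs : List String) :
    processRound elves dirs
      = (PySem.Set.ofList elves).filter (fun x => decide (x ∉ pvW elves dirs))
        ++ (pvW elves dirs).map (fun e => pvV elves dirs e) := by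
  have hLnd : ((PySem.Set.ofList elves).filter
      (fun e => decide (consider e (PySem.Set.ofList elves) dirs ≠ e))).Nodup :=
    List.Nodup.filter _ (PySem.Set.nodup_ofList elves)
  simp only [processRound]
  rw [pv_foldl_ite_insert (fun e => consider e (PySem.Set.ofList elves) dirs ≠ e)
    (fun e => consider e (PySem.Set.ofList elves) dirs)]
  generalize hDict : List.foldl
      (fun (d : PySem.Dict (Int × Int) (Int × Int)) e =>
        d.insert e (consider e (PySem.Set.ofList elves) dirs)) PySem.Dict.empty
      (List.filter (fun e => decide (consider e (PySem.Set.ofList elves) dirs ≠ e))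
        (PySem.Set.ofList elves)) = D
  have hitems : D.items = List.map (fun e => (e, consider e (PySem.Set.ofList elves) dirs))
      (List.filter (fun e => decide (consider e (PySem.Set.ofList elves) dirs ≠ e))
        (PySem.Set.ofList elves)) := by
    rw [← hDict]
    exact pv_insert_fold_items _ _ hLnd
  have hvals : D.values = List.map (fun e => consider e (PySem.Set.ofList elves) dirs)
      (List.filter (fun e => decide (consider e (PySem.Set.ofList elves) dirs ≠ e))
        (PySem.Set.ofList elves)) := by
    rw [← hDict]
    exact pv_insert_fold_values _ _ hLnd
  rw [pv_final_fold _ (fun e => consider e (PySem.Set.ofList elves) dirs)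
    (checkIfCanMove D.values) (PySem.Set.ofList elves) D hitems hLnd]
  rw [hvals]
  have hfilt : List.filter
      (fun k => decide ((checkIfCanMove
        (List.map (fun e => consider e (PySem.Set.ofList elves) dirs)
          (List.filter (fun e => decide (consider e (PySem.Set.ofList elves) dirs ≠ e))
            (PySem.Set.ofList elves)))).contains
          (consider k (PySem.Set.ofList elves) dirs) = true))
      (List.filter (fun e => decide (consider e (PySem.Set.ofList elves) dirs ≠ e))
        (PySem.Set.ofList elves))
      = pvW elves dirs := by
    apply List.filter_congr
    intro k _
    have h2 : (checkIfCanMove (pvDests elves dirs)).contains (pvV elves dirs k) = true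
        ↔ (pvDests elves dirs).count (pvV elves dirs k) = 1 := by
      rw [PySem.Set.contains_iff, pv_mem_checkIfCanMove]
    simpa [pvDests, pvV, pvL] using h2
  rw [hfilt]
  have := pv_move_fold (fun e => pvV elves dirs e) (pvW elves dirs) (PySem.Set.ofList elves)
    (PySem.Set.nodup_ofList elves)
    (fun k hk => List.mem_of_mem_filter (List.mem_of_mem_filter hk))
    (List.Nodup.filter _ (by simpa [pvL] using hLnd))
    (pv_Wmap_nodup elves dirs)
    (pv_W_fresh elves dirs)
  simpa [pvV] using this

-- ===== B-side lemmas =====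

theorem pv_occ_isEmpty (e : Int × Int) (S : PySem.Set (Int × Int)) :
    (occOffsets e S).isEmpty = offs8.all (fun o => !S.contains (e.1 + o.1, e.2 + o.2)) := by
  unfold occOffsets
  cases hall : offs8.all (fun o => !S.contains (e.1 + o.1, e.2 + o.2))
  · rw [List.all_eq_false] at hall
    obtain ⟨o, ho, hc⟩ := hall
    simp only [Bool.not_eq_true, Bool.not_eq_false'] at hc
    rw [List.isEmpty_eq_false_iff_exists_mem]
    exact ⟨o, List.mem_filter.mpr ⟨ho, hc⟩⟩
  · rw [List.isEmpty_iff, List.filter_eq_nil_iff]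
    intro o ho
    have := List.all_eq_true.mp hall o ho
    simpa using this

theorem pv_stepN (e : Int × Int) (S : PySem.Set (Int × Int)) (rest : List String) :
    proposeSideLoop e (occOffsets e S) ("N" :: rest)
      = if checkElves e S [(-1, 0), (-1, 1), (-1, -1)] then some (e.1 + -1, e.2 + 0)
        else proposeSideLoop e (occOffsets e S) rest := by
  simp only [proposeSideLoop, sides, reduceIte]
  have hfree : ((occOffsets e S).all fun o => decide (o.1 * -1 + o.2 * 0 ≠ 1))
      = checkElves e S [(-1, 0), (-1, 1), (-1, -1)] := by
    rw [occOffsets, List.all_filter, pv_checkElves_eq_all]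
    by_cases h1 : (e.1 + -1, e.2) ∈ S <;>
      by_cases h2 : (e.1 + -1, e.2 + 1) ∈ S <;>
        by_cases h3 : (e.1 + -1, e.2 + -1) ∈ S <;>
          simp [offs8, h1, h2, h3]
  rw [hfree]

theorem pv_stepS (e : Int × Int) (S : PySem.Set (Int × Int)) (rest : List String) :
    proposeSideLoop e (occOffsets e S) ("S" :: rest)
      = if checkElves e S [(1, 1), (1, 0), (1, -1)] then some (e.1 + 1, e.2 + 0)
        else proposeSideLoop e (occOffsets e S) rest := by
  simp only [proposeSideLoop, sides, String.reduceEq, reduceIte]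
  have hfree : ((occOffsets e S).all fun o => decide (o.1 * 1 + o.2 * 0 ≠ 1))
      = checkElves e S [(1, 1), (1, 0), (1, -1)] := by
    rw [occOffsets, List.all_filter, pv_checkElves_eq_all]
    by_cases h1 : (e.1 + 1, e.2 + 1) ∈ S <;>
      by_cases h2 : (e.1 + 1, e.2) ∈ S <;>
        by_cases h3 : (e.1 + 1, e.2 + -1) ∈ S <;>
          simp [offs8, h1, h2, h3]
  rw [hfree]

theorem pv_stepE (e : Int × Int) (S : PySem.Set (Int × Int)) (rest : List String) :
    proposeSideLoop e (occOffsets e S) ("E" :: rest)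
      = if checkElves e S [(0, 1), (1, 1), (-1, 1)] then some (e.1 + 0, e.2 + 1)
        else proposeSideLoop e (occOffsets e S) rest := by
  simp only [proposeSideLoop, sides, String.reduceEq, reduceIte]
  have hfree : ((occOffsets e S).all fun o => decide (o.1 * 0 + o.2 * 1 ≠ 1))
      = checkElves e S [(0, 1), (1, 1), (-1, 1)] := by
    rw [occOffsets, List.all_filter, pv_checkElves_eq_all]
    by_cases h1 : (e.1, e.2 + 1) ∈ S <;>
      by_cases h2 : (e.1 + 1, e.2 + 1) ∈ S <;>
        by_cases h3 : (e.1 + -1, e.2 + 1) ∈ S <;>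
          simp [offs8, h1, h2, h3]
  rw [hfree]

theorem pv_stepW (e : Int × Int) (S : PySem.Set (Int × Int)) (rest : List String) :
    proposeSideLoop e (occOffsets e S) ("W" :: rest)
      = if checkElves e S [(0, -1), (1, -1), (-1, -1)] then some (e.1 + 0, e.2 + -1)
        else proposeSideLoop e (occOffsets e S) rest := by
  simp only [proposeSideLoop, sides, String.reduceEq, reduceIte]
  have hfree : ((occOffsets e S).all fun o => decide (o.1 * 0 + o.2 * -1 ≠ 1))
      = checkElves e S [(0, -1), (1, -1), (-1, -1)] := by
    rw [occOffsets, List.all_filter, pv_checkElves_eq_all]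
    by_cases h1 : (e.1, e.2 + -1) ∈ S <;>
      by_cases h2 : (e.1 + 1, e.2 + -1) ∈ S <;>
        by_cases h3 : (e.1 + -1, e.2 + -1) ∈ S <;>
          simp [offs8, h1, h2, h3]
  rw [hfree]

theorem pv_proposeSideLoop_eq (e : Int × Int) (S : PySem.Set (Int × Int)) :
    ∀ (dirs : List String),
      proposeSideLoop e (occOffsets e S) dirs
        = if considerLoop e S dirs = e then none else some (considerLoop e S dirs) := by
  intro dirs
  induction dirs with
  | nil => simp [proposeSideLoop, considerLoop]
  | cons d rest ih =>
    by_cases hN : d = "N"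
    · subst hN
      rw [pv_stepN]
      cases hc : checkElves e S [(-1, 0), (-1, 1), (-1, -1)] with
      | true =>
        simp only [considerLoop, canMoveInDirection, hc, directionToPos, reduceIte,
          Option.getD_some, if_true]
        rw [if_neg (by intro h; have h' := congrArg Prod.fst h; simp at h')]
        simp [Prod.ext_iff] <;> omega
      | false =>
        simp only [considerLoop, canMoveInDirection, hc, reduceIte, if_false]
        exact ih
    · by_cases hS : d = "S"
      · subst hS
        rw [pv_stepS]
        cases hc : checkElves e S [(1, 1), (1, 0), (1, -1)] with
        | true =>
          simp only [considerLoop, canMoveInDirection, hc, directionToPos, String.reduceEq,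
            reduceIte, Option.getD_some, if_true]
          rw [if_neg (by intro h; have h' := congrArg Prod.fst h; simp at h')]
          simp [Prod.ext_iff] <;> omega
        | false =>
          simp only [considerLoop, canMoveInDirection, hc, String.reduceEq, reduceIte, if_false]
          exact ih
      · by_cases hE : d = "E"
        · subst hE
          rw [pv_stepE]
          cases hc : checkElves e S [(0, 1), (1, 1), (-1, 1)] with
          | true =>
            simp only [considerLoop, canMoveInDirection, hc, directionToPos, String.reduceEq,
              reduceIte, Option.getD_some, if_true]
            rw [if_neg (by intro h; have h' := congrArg Prod.snd h; simp at h')]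
            simp [Prod.ext_iff] <;> omega
          | false =>
            simp only [considerLoop, canMoveInDirection, hc, String.reduceEq, reduceIte, if_false]
            exact ih
        · by_cases hW : d = "W"
          · subst hW
            rw [pv_stepW]
            cases hc : checkElves e S [(0, -1), (1, -1), (-1, -1)] with
            | true =>
              simp only [considerLoop, canMoveInDirection, hc, directionToPos, String.reduceEq,
                reduceIte, Option.getD_some, if_true]
              rw [if_neg (by intro h; have h' := congrArg Prod.snd h; simp at h')]
              simp [Prod.ext_iff] <;> omega
            | false =>
              simp only [considerLoop, canMoveInDirection, hc, String.reduceEq, reduceIte,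
                if_false]
              exact ih
          · simp only [proposeSideLoop, considerLoop, canMoveInDirection, sides,
              hN, hS, hE, hW, if_false]
            exact ih

theorem pv_propose_eq (e : Int × Int) (S : PySem.Set (Int × Int)) (dirs : List String) :
    propose e S dirs
      = if consider e S dirs = e then none else some (consider e S dirs) := by
  simp only [propose, consider, pv_occ_isEmpty, pv_flag_eq]
  cases hall : offs8.all (fun o => !S.contains (e.1 + o.1, e.2 + o.2)) <;>
    simp [pv_proposeSideLoop_eq]

-- which cell an elf can move to, and which cells its move certifies empty
theorem pv_considerLoop_shape (e : Int × Int) (S : PySem.Set (Int × Int)) :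
    ∀ (dirs : List String),
      considerLoop e S dirs = e ∨
      (considerLoop e S dirs = (e.1 - 1, e.2) ∧
        (e.1 + -1, e.2) ∉ S ∧ (e.1 + -1, e.2 + 1) ∉ S ∧ (e.1 + -1, e.2 + -1) ∉ S) ∨
      (considerLoop e S dirs = (e.1 + 1, e.2) ∧
        (e.1 + 1, e.2 + 1) ∉ S ∧ (e.1 + 1, e.2) ∉ S ∧ (e.1 + 1, e.2 + -1) ∉ S) ∨
      (considerLoop e S dirs = (e.1, e.2 + 1) ∧
        (e.1, e.2 + 1) ∉ S ∧ (e.1 + 1, e.2 + 1) ∉ S ∧ (e.1 + -1, e.2 + 1) ∉ S) ∨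
      (considerLoop e S dirs = (e.1, e.2 - 1) ∧
        (e.1, e.2 + -1) ∉ S ∧ (e.1 + 1, e.2 + -1) ∉ S ∧ (e.1 + -1, e.2 + -1) ∉ S) := by
  intro dirs
  induction dirs with
  | nil => exact Or.inl rfl
  | cons d rest ih =>
    by_cases hN : d = "N"
    · subst hN
      cases hc : checkElves e S [(-1, 0), (-1, 1), (-1, -1)] with
      | true =>
        have hb := hc
        rw [pv_checkElves_eq_all] at hc
        simp only [List.all_cons, List.all_nil, Bool.and_true, Bool.and_eq_true,
          Bool.not_eq_true', PySem.Set.contains_eq_listContains] at hc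
        refine Or.inr (Or.inl ⟨?_, ?_, ?_, ?_⟩)
        · simp only [considerLoop, canMoveInDirection, hb, directionToPos, reduceIte,
            Option.getD_some, if_true]
        · simpa using hc.1
        · simpa using hc.2.1
        · simpa using hc.2.2
      | false =>
        simp only [considerLoop, canMoveInDirection, hc, reduceIte, if_false]
        exact ih
    · by_cases hS : d = "S"
      · subst hS
        cases hc : checkElves e S [(1, 1), (1, 0), (1, -1)] with
        | true =>
          have hb := hc
          rw [pv_checkElves_eq_all] at hc
          simp only [List.all_cons, List.all_nil, Bool.and_true, Bool.and_eq_true,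
            Bool.not_eq_true', PySem.Set.contains_eq_listContains] at hc
          refine Or.inr (Or.inr (Or.inl ⟨?_, ?_, ?_, ?_⟩))
          · simp only [considerLoop, canMoveInDirection, hb, directionToPos, String.reduceEq,
              reduceIte, Option.getD_some, if_true]
          · simpa using hc.1
          · simpa using hc.2.1
          · simpa using hc.2.2
        | false =>
          simp only [considerLoop, canMoveInDirection, hc, String.reduceEq, reduceIte, if_false]
          exact ih
      · by_cases hE : d = "E"
        · subst hE
          cases hc : checkElves e S [(0, 1), (1, 1), (-1, 1)] with
          | true =>
            have hb := hc
            rw [pv_checkElves_eq_all] at hc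
            simp only [List.all_cons, List.all_nil, Bool.and_true, Bool.and_eq_true,
              Bool.not_eq_true', PySem.Set.contains_eq_listContains] at hc
            refine Or.inr (Or.inr (Or.inr (Or.inl ⟨?_, ?_, ?_, ?_⟩)))
            · simp only [considerLoop, canMoveInDirection, hb, directionToPos, String.reduceEq,
                reduceIte, Option.getD_some, if_true]
            · simpa using hc.1
            · simpa using hc.2.1
            · simpa using hc.2.2
          | false =>
            simp only [considerLoop, canMoveInDirection, hc, String.reduceEq, reduceIte,
              if_false]
            exact ih
        · by_cases hW : d = "W"
          · subst hW
            cases hc : checkElves e S [(0, -1), (1, -1), (-1, -1)] with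
            | true =>
              have hb := hc
              rw [pv_checkElves_eq_all] at hc
              simp only [List.all_cons, List.all_nil, Bool.and_true, Bool.and_eq_true,
                Bool.not_eq_true', PySem.Set.contains_eq_listContains] at hc
              refine Or.inr (Or.inr (Or.inr (Or.inr ⟨?_, ?_, ?_, ?_⟩)))
              · simp only [considerLoop, canMoveInDirection, hb, directionToPos,
                  String.reduceEq, reduceIte, Option.getD_some, if_true]
              · simpa using hc.1
              · simpa using hc.2.1
              · simpa using hc.2.2
            | false =>
              simp only [considerLoop, canMoveInDirection, hc, String.reduceEq, reduceIte,
                if_false]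
              exact ih
          · simp only [considerLoop, canMoveInDirection, hN, hS, hE, hW, if_false]
            exact ih

theorem pv_consider_shape (e : Int × Int) (S : PySem.Set (Int × Int)) (dirs : List String)
    (h : consider e S dirs ≠ e) :
    (consider e S dirs = (e.1 - 1, e.2) ∧
      (e.1 + -1, e.2) ∉ S ∧ (e.1 + -1, e.2 + 1) ∉ S ∧ (e.1 + -1, e.2 + -1) ∉ S) ∨
    (consider e S dirs = (e.1 + 1, e.2) ∧
      (e.1 + 1, e.2 + 1) ∉ S ∧ (e.1 + 1, e.2) ∉ S ∧ (e.1 + 1, e.2 + -1) ∉ S) ∨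
    (consider e S dirs = (e.1, e.2 + 1) ∧
      (e.1, e.2 + 1) ∉ S ∧ (e.1 + 1, e.2 + 1) ∉ S ∧ (e.1 + -1, e.2 + 1) ∉ S) ∨
    (consider e S dirs = (e.1, e.2 - 1) ∧
      (e.1, e.2 + -1) ∉ S ∧ (e.1 + 1, e.2 + -1) ∉ S ∧ (e.1 + -1, e.2 + -1) ∉ S) := by
  simp only [consider] at h ⊢
  cases hw : ((getNeighborPos e.1 e.2).foldl (fun b n => if S.contains n then true else b) false)
  · rw [hw] at h
    simp at h
  · rw [hw] at h
    simp only [reduceIte] at h ⊢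
    rcases pv_considerLoop_shape e S dirs with heq | hsh
    · exact absurd heq h
    · exact hsh

-- at most two elves can propose the same cell, and they face each other head-on:
-- a second proposer of p is exactly the first one's mirror image through p
theorem pv_second_prover (S : PySem.Set (Int × Int)) (dirs : List String)
    (e1 e2 p : Int × Int) (hS1 : e1 ∈ S)
    (hne : e1 ≠ e2)
    (hp1 : consider e1 S dirs = p) (hq1 : p ≠ e1)
    (hp2 : consider e2 S dirs = p) (hq2 : p ≠ e2) :
    e2 = (2 * p.1 - e1.1, 2 * p.2 - e1.2) := by
  have hsh1 := pv_consider_shape e1 S dirs (by rw [hp1]; exact hq1)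
  have hsh2 := pv_consider_shape e2 S dirs (by rw [hp2]; exact hq2)
  rw [hp1] at hsh1
  rw [hp2] at hsh2
  rcases hsh1 with ⟨h1e, h1a, h1b, h1c⟩ | ⟨h1e, h1a, h1b, h1c⟩ |
      ⟨h1e, h1a, h1b, h1c⟩ | ⟨h1e, h1a, h1b, h1c⟩ <;>
    rcases hsh2 with ⟨h2e, h2a, h2b, h2c⟩ | ⟨h2e, h2a, h2b, h2c⟩ |
        ⟨h2e, h2a, h2b, h2c⟩ | ⟨h2e, h2a, h2b, h2c⟩ <;>
      simp only [Prod.ext_iff] at h1e h2e <;>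
        obtain ⟨h1x, h1y⟩ := h1e <;> obtain ⟨h2x, h2y⟩ := h2e
  -- e1 moved N
  · -- e2 moved N: e1 = e2, contradiction
    exact absurd (Prod.ext_iff.mpr ⟨by omega, by omega⟩ : e1 = e2) hne
  · -- e2 moved S: head-on mirror
    exact Prod.ext_iff.mpr ⟨by omega, by omega⟩
  · -- e2 moved E: its check row contains e1
    exact absurd hS1 (by
      have hx : e1 = (e2.1 + 1, e2.2 + 1) := Prod.ext_iff.mpr ⟨by omega, by omega⟩
      rw [hx]; exact h2b)
  · -- e2 moved W
    exact absurd hS1 (by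
      have hx : e1 = (e2.1 + 1, e2.2 + -1) := Prod.ext_iff.mpr ⟨by omega, by omega⟩
      rw [hx]; exact h2b)
  -- e1 moved S
  · exact Prod.ext_iff.mpr ⟨by omega, by omega⟩
  · exact absurd (Prod.ext_iff.mpr ⟨by omega, by omega⟩ : e1 = e2) hne
  · exact absurd hS1 (by
      have hx : e1 = (e2.1 + -1, e2.2 + 1) := Prod.ext_iff.mpr ⟨by omega, by omega⟩
      rw [hx]; exact h2c)
  · exact absurd hS1 (by
      have hx : e1 = (e2.1 + -1, e2.2 + -1) := Prod.ext_iff.mpr ⟨by omega, by omega⟩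
      rw [hx]; exact h2c)
  -- e1 moved E
  · exact absurd hS1 (by
      have hx : e1 = (e2.1 + -1, e2.2 + -1) := Prod.ext_iff.mpr ⟨by omega, by omega⟩
      rw [hx]; exact h2c)
  · exact absurd hS1 (by
      have hx : e1 = (e2.1 + 1, e2.2 + -1) := Prod.ext_iff.mpr ⟨by omega, by omega⟩
      rw [hx]; exact h2c)
  · exact absurd (Prod.ext_iff.mpr ⟨by omega, by omega⟩ : e1 = e2) hne
  · exact Prod.ext_iff.mpr ⟨by omega, by omega⟩
  -- e1 moved W
  · exact absurd hS1 (by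
      have hx : e1 = (e2.1 + -1, e2.2 + 1) := Prod.ext_iff.mpr ⟨by omega, by omega⟩
      rw [hx]; exact h2b)
  · exact absurd hS1 (by
      have hx : e1 = (e2.1 + 1, e2.2 + 1) := Prod.ext_iff.mpr ⟨by omega, by omega⟩
      rw [hx]; exact h2a)
  · exact Prod.ext_iff.mpr ⟨by omega, by omega⟩
  · exact absurd (Prod.ext_iff.mpr ⟨by omega, by omega⟩ : e1 = e2) hne

theorem pv_count_map {α β : Type} [BEq β] (l : List α) (f : α → β) (b : β) :
    (l.map f).count b = l.countP (fun x => f x == b) := by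
  rw [List.count, List.countP_map]; rfl

theorem pv_count_dest (elves : List (Int × Int)) (dirs : List String)
    (e : Int × Int) (he : e ∈ pvL elves dirs) :
    ((pvDests elves dirs).count (pvV elves dirs e) = 1
      ↔ ∀ x ∈ pvL elves dirs, pvV elves dirs x = pvV elves dirs e → x = e) := by
  have hnd : (pvL elves dirs).Nodup := List.Nodup.filter _ (PySem.Set.nodup_ofList elves)
  rw [pvDests, pv_count_map, List.countP_eq_length_filter]
  set L' := (pvL elves dirs).filter (fun x => pvV elves dirs x == pvV elves dirs e) with hL'
  have heL' : e ∈ L' := List.mem_filter.mpr ⟨he, by simp⟩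
  have hndL' : L'.Nodup := hnd.filter _
  constructor
  · intro hlen x hx hvx
    obtain ⟨a, ha⟩ := List.length_eq_one_iff.mp hlen
    have hea : e = a := by
      have := heL'
      rw [ha] at this
      simpa using this
    have hxa : x = a := by
      have hxL' : x ∈ L' := List.mem_filter.mpr ⟨hx, by simp [hvx]⟩
      rw [ha] at hxL'
      simpa using hxL'
    rw [hxa, ← hea]
  · intro hall
    have hone : ∀ b ∈ L', b = e := by
      intro b hb
      obtain ⟨hbL, hbv⟩ := List.mem_filter.mp hb
      exact hall b hbL (by simpa using hbv)
    have h1 : L'.count e = L'.length := List.count_eq_length.mpr (fun b hb => (hone b hb).symm)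
    have h2 : L'.count e ≤ 1 := List.nodup_iff_count_le_one.mp hndL' e
    have h3 : 1 ≤ L'.count e := List.one_le_count_iff.mpr heL'
    omega

theorem pv_blocked_iff (elves : List (Int × Int)) (dirs : List String) (e : Int × Int)
    (he : e ∈ PySem.Set.ofList elves)
    (hne : consider e (PySem.Set.ofList elves) dirs ≠ e) :
    (blocked e (consider e (PySem.Set.ofList elves) dirs) (PySem.Set.ofList elves) dirs = true
      ↔ ∃ x ∈ pvL elves dirs, x ≠ e
          ∧ pvV elves dirs x = consider e (PySem.Set.ofList elves) dirs) := by
  set S := PySem.Set.ofList elves with hSdef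
  set p := consider e S dirs with hpdef
  simp only [blocked, Bool.and_eq_true, beq_iff_eq, PySem.Set.contains_iff]
  constructor
  · rintro ⟨hmemS, hprop⟩
    rw [pv_propose_eq] at hprop
    by_cases hcm : consider (2 * p.1 - e.1, 2 * p.2 - e.2) S dirs
        = (2 * p.1 - e.1, 2 * p.2 - e.2)
    · rw [if_pos hcm] at hprop
      simp at hprop
    · rw [if_neg hcm] at hprop
      have hcp : consider (2 * p.1 - e.1, 2 * p.2 - e.2) S dirs = p :=
        Option.some.inj hprop
      refine ⟨(2 * p.1 - e.1, 2 * p.2 - e.2), ?_, ?_, ?_⟩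
      · exact List.mem_filter.mpr ⟨hmemS, by simpa using hcm⟩
      · intro hx
        apply hne
        have h1 : 2 * p.1 - e.1 = e.1 := congrArg Prod.fst hx
        have h2 : 2 * p.2 - e.2 = e.2 := congrArg Prod.snd hx
        exact (Prod.ext_iff.mpr ⟨by omega, by omega⟩ : p = e)
      · exact hcp
  · rintro ⟨x, hxL, hxe, hxv⟩
    obtain ⟨hxS, hxc⟩ := List.mem_filter.mp hxL
    have hxcons : consider x S dirs ≠ x := by simpa using hxc
    have hxp : consider x S dirs = p := hxv
    have hmirror : x = (2 * p.1 - e.1, 2 * p.2 - e.2) :=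
      pv_second_prover S dirs e x p he (Ne.symm hxe) hpdef.symm
        hne hxp (fun hq => hxcons (hxp.trans hq))
    constructor
    · rw [← hmirror]; exact hxS
    · rw [← hmirror, pv_propose_eq, if_neg hxcons, hxp]

-- whether B leaves an elf in place
def pvStays (S : PySem.Set (Int × Int)) (dirs : List String) (e : Int × Int) : Bool :=
  match propose e S dirs with
  | none => true
  | some p => blocked e p S dirs

theorem pv_stays_iff (elves : List (Int × Int)) (dirs : List String) (e : Int × Int)
    (he : e ∈ PySem.Set.ofList elves) :
    (pvStays (PySem.Set.ofList elves) dirs e = true ↔ e ∉ pvW elves dirs) := by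
  have hmemW : e ∈ pvW elves dirs
      ↔ (consider e (PySem.Set.ofList elves) dirs ≠ e
          ∧ (pvDests elves dirs).count (pvV elves dirs e) = 1) := by
    rw [pvW, List.mem_filter, pvL, List.mem_filter]
    simp [he, and_assoc]
  cases hcm : decide (consider e (PySem.Set.ofList elves) dirs = e) with
  | true =>
    have hcm' : consider e (PySem.Set.ofList elves) dirs = e := of_decide_eq_true hcm
    have hprop : propose e (PySem.Set.ofList elves) dirs = none := by
      rw [pv_propose_eq, if_pos hcm']
    simp only [pvStays, hprop]
    simp [hmemW, hcm']
  | false =>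
    have hcm' : consider e (PySem.Set.ofList elves) dirs ≠ e := of_decide_eq_false hcm
    have hprop : propose e (PySem.Set.ofList elves) dirs
        = some (consider e (PySem.Set.ofList elves) dirs) := by
      rw [pv_propose_eq, if_neg hcm']
    have heL : e ∈ pvL elves dirs := List.mem_filter.mpr ⟨he, by simpa using hcm'⟩
    simp only [pvStays, hprop]
    rw [pv_blocked_iff elves dirs e he hcm', hmemW]
    have hcnt := pv_count_dest elves dirs e heL
    constructor
    · rintro ⟨x, hxL, hxe, hxv⟩ ⟨-, h1⟩
      exact hxe (hcnt.mp h1 x hxL (by rw [hxv]; rfl))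
    · intro hnot
      by_contra hnone
      simp only [not_exists, not_and] at hnone
      apply hnot
      refine ⟨hcm', hcnt.mpr ?_⟩
      intro x hx hvx
      by_contra hxe
      exact hnone x hx hxe (by rw [hvx]; rfl)

theorem pv_B_fold (S : PySem.Set (Int × Int)) (dirs : List String) :
    ∀ (l : List (Int × Int)) (s m : List (Int × Int)),
      l.foldl
        (fun (acc : List (Int × Int) × List (Int × Int)) e =>
          match propose e S dirs with
          | none => (acc.1 ++ [e], acc.2)
          | some p =>
            if blocked e p S dirs then (acc.1 ++ [e], acc.2)
            else (acc.1, acc.2 ++ [p]))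
        (s, m)
      = (s ++ l.filter (pvStays S dirs),
         m ++ (l.filter (fun e => !pvStays S dirs e)).map (fun e => consider e S dirs)) := by
  intro l
  induction l with
  | nil => intro s m; simp
  | cons e t ih =>
    intro s m
    rw [List.foldl_cons]
    cases hp : propose e S dirs with
    | none =>
      have hst : pvStays S dirs e = true := by simp [pvStays, hp]
      simp only [hp]
      rw [ih]
      simp [List.filter_cons, hst]
    | some p =>
      have hpc : consider e S dirs = p := by
        rw [pv_propose_eq] at hp
        by_cases hcm : consider e S dirs = e
        · rw [if_pos hcm] at hp; simp at hp
        · rw [if_neg hcm] at hp; exact Option.some.inj hp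
      cases hb : blocked e p S dirs with
      | true =>
        have hst : pvStays S dirs e = true := by simp [pvStays, hp, hb]
        simp only [hp, hb, reduceIte]
        rw [ih]
        simp [List.filter_cons, hst]
      | false =>
        have hst : pvStays S dirs e = false := by simp [pvStays, hp, hb]
        simp only [hp, hb, Bool.false_eq_true, if_false]
        rw [ih]
        simp [List.filter_cons, hst, hpc]

theorem pv_B_eq (elves : List (Int × Int)) (dirs : List String) :
    processRound_alt elves dirs
      = (PySem.Set.ofList elves).filter (fun x => decide (x ∉ pvW elves dirs))
        ++ (pvW elves dirs).map (fun e => pvV elves dirs e) := by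
  simp only [processRound_alt]
  rw [pv_B_fold (PySem.Set.ofList elves) dirs (PySem.Set.ofList elves) [] []]
  simp only [List.nil_append]
  have hstay : (PySem.Set.ofList elves).filter (pvStays (PySem.Set.ofList elves) dirs)
      = (PySem.Set.ofList elves).filter (fun x => decide (x ∉ pvW elves dirs)) := by
    apply List.filter_congr
    intro x hx
    have h := pv_stays_iff elves dirs x hx
    cases hs : pvStays (PySem.Set.ofList elves) dirs x with
    | true => simp [hs] at h; simp [h]
    | false =>
      rw [hs] at h
      have : x ∈ pvW elves dirs := by
        by_contra hc
        exact absurd (h.mpr hc) (by simp)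
      simp [this]
  have hmove : (PySem.Set.ofList elves).filter
        (fun e => !pvStays (PySem.Set.ofList elves) dirs e)
      = pvW elves dirs := by
    have hWform : pvW elves dirs
        = (PySem.Set.ofList elves).filter
            (fun x => decide ((pvDests elves dirs).count (pvV elves dirs x) = 1)
              && decide (consider x (PySem.Set.ofList elves) dirs ≠ x)) := by
      rw [pvW, pvL, List.filter_filter]
    rw [hWform]
    apply List.filter_congr
    intro x hx
    have h := pv_stays_iff elves dirs x hx
    have hmemW : x ∈ pvW elves dirs
        ↔ (decide ((pvDests elves dirs).count (pvV elves dirs x) = 1)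
            && decide (consider x (PySem.Set.ofList elves) dirs ≠ x)) = true := by
      rw [hWform, List.mem_filter]
      simp [hx]
    cases hs : pvStays (PySem.Set.ofList elves) dirs x with
    | true =>
      rw [hs] at h
      have : x ∉ pvW elves dirs := h.mp rfl
      rw [hmemW] at this
      simp only [Bool.not_true]
      exact (Bool.not_eq_true _).mp (fun hc => this hc) |>.symm
    | false =>
      rw [hs] at h
      have : x ∈ pvW elves dirs := by
        by_contra hc
        exact absurd (h.mpr hc) (by simp)
      rw [hmemW] at this
      simp only [Bool.not_false]
      exact this.symm
  rw [hstay, hmove]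
  have hmap : (pvW elves dirs).map (fun e => consider e (PySem.Set.ofList elves) dirs)
      = (pvW elves dirs).map (fun e => pvV elves dirs e) := rfl
  rw [hmap]
  apply PySem.Set.ofList_eq_self_of_nodup
  refine List.Nodup.append (List.Nodup.filter _ (PySem.Set.nodup_ofList elves))
    (pv_Wmap_nodup elves dirs) ?_
  intro a ha hb
  obtain ⟨k, hk, rfl⟩ := List.mem_map.mp hb
  exact pv_W_fresh elves dirs k hk (List.mem_of_mem_filter ha)

theorem pv_main (elves : List (Int × Int)) (dirs : List String) :
    processRound elves dirs = processRound_alt elves dirs := by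
  rw [pv_A_eq, pv_B_eq]

-- ===== VERDICT (by name: the statement is the Claim_ definition above) =====
theorem processRound_spec : Claim_equal_processRound := by
  intro elves precedenceDirs _
  exact pv_main elves precedenceDirs
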